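-- pv_equiv track=rewrite | github.com/2489742701/V2rayN-Eyes | 论坛正常.py | smart_deduplicate
-- ===== SOURCE A (Python) =====
-- def smart_deduplicate(links):
--     node_map = {}
--     for raw_link in links:
--         clean_link = raw_link.strip()
--         if clean_link.endswith("&amp"): clean_link = clean_link[:-4]
--         elif clean_link.endswith("&"): clean_link = clean_link[:-1]
--         if not clean_link: continue
--         try:
--             core = clean_link.split("://")[1].split("#")[0].split("?")[0]
--             if "@" in core: core = core.split("@")[1]
--             fingerprint = core
--         except: fingerprint = clean_link
--         if fingerprint in node_map:
--             if len(clean_link) > len(node_map[fingerprint]): node_map[fingerprint] = clean_link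
--         else: node_map[fingerprint] = clean_link
--     return list(node_map.values())
-- ===== SOURCE B (Python) =====
-- def smart_deduplicate(links):
--     # Two-pass: group all cleaned links by fingerprint, then reduce each
--     # group to its longest member (max with key=len keeps the first maximum,
--     # matching the original's strict '>' tie-break).
--     groups = {}
--     for raw_link in links:
--         clean_link = raw_link.strip()
--         if clean_link.endswith("&amp"): clean_link = clean_link[:-4]
--         elif clean_link.endswith("&"): clean_link = clean_link[:-1]
--         if not clean_link: continue
--         try:
--             core = clean_link.split("://")[1].split("#")[0].split("?")[0]
--             if "@" in core: core = core.split("@")[1]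
--             fingerprint = core
--         except: fingerprint = clean_link
--         groups.setdefault(fingerprint, []).append(clean_link)
--     return [max(group, key=len) for group in groups.values()]
-- ===== Notes on version B (the rewrite author's own statement) =====
-- stated objective: alternative
-- what changed: Instead of interleaving the keep-the-longest update with the scan, B first builds a fingerprint-to-group table of all cleaned links in encounter order and then reduces each group to its first longest member with max(key=len) in a second pass.
import Mathlib
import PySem

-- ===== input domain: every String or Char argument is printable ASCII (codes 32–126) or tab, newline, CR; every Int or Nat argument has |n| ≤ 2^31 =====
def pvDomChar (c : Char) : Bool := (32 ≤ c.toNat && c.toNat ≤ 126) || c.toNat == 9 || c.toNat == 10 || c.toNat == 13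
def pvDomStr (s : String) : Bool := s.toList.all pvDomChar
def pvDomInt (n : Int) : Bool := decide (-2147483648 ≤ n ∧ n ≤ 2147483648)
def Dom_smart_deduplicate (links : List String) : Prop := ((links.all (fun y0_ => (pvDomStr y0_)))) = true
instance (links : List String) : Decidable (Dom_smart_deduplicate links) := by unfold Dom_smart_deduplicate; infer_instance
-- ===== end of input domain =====

-- B builds a fingerprint→group table first and reduces each group to its first
-- longest member in a second pass, instead of A's interleaved keep-the-longest
-- update (objective: alternative decomposition, same cost).

-- ===== PORT A =====
-- shared fingerprint extraction (these lines are identical in A and in B):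
-- clean_link = raw_link.strip(); '&amp'/'&' suffix trim
def pvClean (raw_link : String) : List Char :=
  let s := PySem.Chars.strip raw_link.toList
  if PySem.Chars.endswith s ("&amp".toList) then PySem.List.slice s none (some (-4))
  else if PySem.Chars.endswith s ("&".toList) then PySem.List.slice s none (some (-1))
  else s

-- try: core = clean.split("://")[1].split("#")[0].split("?")[0]; '@' step; except: clean
-- (every 'none' of pyGet? is exactly an IndexError caught by the bare except)
def pvFingerprint (s : List Char) : List Char :=
  match PySem.List.pyGet? (PySem.Chars.splitOn s ("://".toList)) 1 with
  | none => s
  | some r =>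
    match PySem.List.pyGet? (PySem.Chars.splitOn r ("#".toList)) 0 with
    | none => s
    | some r2 =>
      match PySem.List.pyGet? (PySem.Chars.splitOn r2 ("?".toList)) 0 with
      | none => s
      | some core =>
        if PySem.Chars.isIn ("@".toList) core then
          match PySem.List.pyGet? (PySem.Chars.splitOn core ("@".toList)) 1 with
          | none => s
          | some c => c
        else core

-- A's loop body: keep the longer link per fingerprint, first wins ties
def pvStepA (node_map : PySem.Dict (List Char) (List Char)) (raw_link : String) :
    PySem.Dict (List Char) (List Char) :=
  let clean_link := pvClean raw_link
  if clean_link = [] then node_map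
  else
    let fingerprint := pvFingerprint clean_link
    match node_map.get? fingerprint with
    | some v =>
        if v.length < clean_link.length then node_map.insert fingerprint clean_link
        else node_map
    | none => node_map.insert fingerprint clean_link

def smart_deduplicate (links : List String) : List String :=
  (links.foldl pvStepA PySem.Dict.empty).values.map (fun cs => String.ofList cs)

-- ===== PORT B =====
-- B's loop body: groups.setdefault(fingerprint, []).append(clean_link)
def pvStepB (groups : PySem.Dict (List Char) (List (List Char))) (raw_link : String) :
    PySem.Dict (List Char) (List (List Char)) :=
  let clean_link := pvClean raw_link
  if clean_link = [] then groups
  else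
    let fingerprint := pvFingerprint clean_link
    groups.modify fingerprint [] (fun g => g ++ [clean_link])

-- max(group, key=len): the group is never empty; Python max returns the FIRST maximum
def pvBest (g : List (List Char)) : List Char :=
  (PySem.List.max? g (fun cs => cs.length)).getD []

def smart_deduplicate_alt (links : List String) : List String :=
  (links.foldl pvStepB PySem.Dict.empty).values.map (fun g => String.ofList (pvBest g))

-- ===== PRECONDITION & SPEC =====
def Spec_smart_deduplicate (links : List String) (out : List String) : Prop := out = smart_deduplicate_alt links
instance (links : List String) (out : List String) : Decidable (Spec_smart_deduplicate links out) := by unfold Spec_smart_deduplicate; infer_instance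

-- ===== CLAIM (what is proved, stated in full; the proofs are below) =====
def Claim_equal_smart_deduplicate : Prop := ∀ (links : List String), Dom_smart_deduplicate links → Spec_smart_deduplicate links (smart_deduplicate links)

-- ===== LEMMAS AND PROOFS =====

-- invariant tying A's dict to B's group table: same keys in order, A's value is
-- the first longest member of B's (nonempty) group, and keys are distinct
def pvRel (dA : PySem.Dict (List Char) (List Char))
    (dB : PySem.Dict (List Char) (List (List Char))) : Prop :=
  dA.items = dB.items.map (fun p => (p.1, pvBest p.2)) ∧
  (dB.items.map Prod.fst).Nodup ∧
  ∀ p ∈ dB.items, p.2 ≠ []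

theorem pvBest_append (g : List (List Char)) (c : List Char) (hg : g ≠ []) :
    pvBest (g ++ [c]) = if (pvBest g).length < c.length then c else pvBest g := by
  obtain ⟨x, t, rfl⟩ := List.exists_cons_of_ne_nil hg
  suffices h : ∀ (t : List (List Char)) (x : List Char),
      PySem.List.max? (x :: t ++ [c]) (fun cs => cs.length)
        = some (if (pvBest (x :: t)).length < c.length then c else pvBest (x :: t)) by
    have h' := h t x
    simp only [List.cons_append] at h'
    simp [pvBest, h']
  intro t
  induction t with
  | nil => intro x; by_cases h : x.length < c.length <;> simp [pvBest, PySem.List.max?, h]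
  | cons y t ih =>
      intro x
      have hx : pvBest (x :: y :: t) = pvBest ((if x.length < y.length then y else x) :: t) := by
        by_cases h : x.length < y.length <;> simp [pvBest, PySem.List.max?, h]
      have := ih (if x.length < y.length then y else x)
      by_cases h : x.length < y.length <;>
        simpa [PySem.List.max?, h, hx] using this

-- with distinct keys, any entry whose key find? matched is the found entry
theorem pvMem_eq_of_find? {ν : Type} (l : List ((List Char) × ν)) (k : List Char)
    (e : (List Char) × ν) (hnd : (l.map Prod.fst).Nodup)
    (hfind : l.find? (fun p => p.1 == k) = some e)
    (p : (List Char) × ν) (hp : p ∈ l) (hpk : p.1 = k) : p = e := by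
  induction l with
  | nil => cases hp
  | cons q t ih =>
      rw [List.map_cons, List.nodup_cons] at hnd
      by_cases hq : (q.1 == k) = true
      · simp only [List.find?_cons, hq] at hfind
        obtain rfl : q = e := by injection hfind
        rcases List.mem_cons.mp hp with rfl | hp
        · rfl
        · have hq1 : q.1 = k := by simpa using hq
          exact absurd (List.mem_map.mpr ⟨p, hp, by rw [hpk, hq1]⟩) hnd.1
      · rw [Bool.not_eq_true] at hq
        simp only [List.find?_cons, hq] at hfind
        rcases List.mem_cons.mp hp with rfl | hp
        · simp [hpk] at hq
        · exact ih hnd.2 hfind hp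

theorem pvRel_step (dA : PySem.Dict (List Char) (List Char))
    (dB : PySem.Dict (List Char) (List (List Char))) (h : pvRel dA dB) (raw : String) :
    pvRel (pvStepA dA raw) (pvStepB dB raw) := by
  obtain ⟨hitems, hnd, hne⟩ := h
  unfold pvStepA pvStepB
  by_cases hc : pvClean raw = []
  · simpa [hc] using ⟨hitems, hnd, hne⟩
  simp only [hc, if_false]
  set c := pvClean raw with hcdef
  set fp := pvFingerprint c with hfpdef
  -- A's lookup mirrors B's
  have hfind : dA.items.find? (fun p => p.1 == fp)
      = (dB.items.find? (fun p => p.1 == fp)).map (fun p => (p.1, pvBest p.2)) := by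
    rw [hitems, List.find?_map]
    rfl
  have hcontA : dA.contains fp = dB.contains fp := by
    simp only [PySem.Dict.contains, hitems, List.any_map]
    rfl
  cases hB : dB.items.find? (fun p => p.1 == fp) with
  | none =>
      -- new key in both: append
      have hget : dA.get? fp = none := by simp [PySem.Dict.get?, hfind, hB]
      have hgetB : dB.get? fp = none := by simp [PySem.Dict.get?, hB]
      have hcont : dB.contains fp = false := by
        simp only [PySem.Dict.contains]
        rw [List.any_eq_false]
        intro p hp
        exact List.find?_eq_none.mp hB p hp
      rw [hget]
      simp only [PySem.Dict.modify, PySem.Dict.getD, hgetB, Option.getD_none, List.nil_append,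
        PySem.Dict.insert, hcont, hcontA, if_false, Bool.false_eq_true]
      refine ⟨?_, ?_, ?_⟩
      · simp [hitems, pvBest, PySem.List.max?]
      · simp only [List.map_append, List.map_cons, List.map_nil]
        apply List.Nodup.append hnd (List.nodup_singleton fp)
        intro a ha hb
        simp only [List.mem_singleton] at hb
        subst hb
        obtain ⟨p, hp, hpk⟩ := List.mem_map.mp ha
        have := List.find?_eq_none.mp hB p hp
        simp [hpk] at this
      · intro p hp
        rcases List.mem_append.mp hp with hp | hp
        · exact hne p hp
        · simp only [List.mem_singleton] at hp; subst hp; simp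
  | some e =>
      have hek : e.1 = fp := by simpa using List.find?_some hB
      have hem : e ∈ dB.items := List.mem_of_find?_eq_some hB
      have hgne : e.2 ≠ [] := hne e hem
      have hget : dA.get? fp = some (pvBest e.2) := by
        simp [PySem.Dict.get?, hfind, hB]
      have hgetB : dB.get? fp = some e.2 := by simp [PySem.Dict.get?, hB]
      have hcont : dB.contains fp = true := by
        simp only [PySem.Dict.contains, List.any_eq_true]
        exact ⟨e, hem, by simp [hek]⟩
      rw [hget]
      have hbestapp := pvBest_append e.2 c hgne
      -- B replaces the fp entry (in place) with e.2 ++ [c]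
      simp only [PySem.Dict.modify, PySem.Dict.getD, hgetB, Option.getD_some,
        PySem.Dict.insert, hcont, hcontA, if_true]
      have hkeysB : ((dB.items.map fun p => if (p.1 == fp) = true then (fp, e.2 ++ [c]) else p).map
          Prod.fst) = dB.items.map Prod.fst := by
        rw [List.map_map]
        apply List.map_congr_left
        intro p hp
        by_cases hpk : (p.1 == fp) = true
        · simp only [Function.comp, hpk, if_true]
          exact ((by simpa using hpk : p.1 = fp)).symm
        · simp [Function.comp, hpk]
      refine ⟨?_, by rw [hkeysB]; exact hnd, ?_⟩
      · by_cases hlt : (pvBest e.2).length < c.length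
        · simp only [hlt, if_true]
          rw [hitems, List.map_map, List.map_map]
          apply List.map_congr_left
          intro p hp
          by_cases hpk : (p.1 == fp) = true
          · simp [Function.comp, hpk, hbestapp, hlt]
          · simp [Function.comp, hpk]
        · simp only [hlt, if_false]
          rw [hitems, List.map_map]
          apply List.map_congr_left
          intro p hp
          by_cases hpk : (p.1 == fp) = true
          · have hpe : p = e := pvMem_eq_of_find? dB.items fp e hnd hB p hp (by simpa using hpk)
            simp [Function.comp, hbestapp, hlt, hpe, hek]
          · simp [Function.comp, hpk]
      · intro p hp
        obtain ⟨q, hq, hqe⟩ := List.mem_map.mp hp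
        by_cases hpk : (q.1 == fp) = true
        · simp only [hpk, if_true] at hqe; subst hqe; simp
        · simp only [hpk, if_false, Bool.false_eq_true] at hqe; subst hqe; exact hne q hq

theorem pvRel_foldl (links : List String) (dA : PySem.Dict (List Char) (List Char))
    (dB : PySem.Dict (List Char) (List (List Char))) (h : pvRel dA dB) :
    pvRel (links.foldl pvStepA dA) (links.foldl pvStepB dB) := by
  induction links generalizing dA dB with
  | nil => exact h
  | cons x t ih => exact ih _ _ (pvRel_step dA dB h x)

-- ===== VERDICT (by name: the statement is the Claim_ definition above) =====
theorem smart_deduplicate_spec : Claim_equal_smart_deduplicate := by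
  intro links _
  show smart_deduplicate links = smart_deduplicate_alt links
  have h := pvRel_foldl links PySem.Dict.empty PySem.Dict.empty
    ⟨by simp [PySem.Dict.empty], by simp [PySem.Dict.empty], by simp [PySem.Dict.empty]⟩
  unfold smart_deduplicate smart_deduplicate_alt
  simp only [PySem.Dict.values, h.1, List.map_map]
  rfl
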